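-- pv_equiv track=rewrite | github.com/xb0yx2k20/tfl | lab2/main.py | find_matching_star
-- ===== SOURCE A (Python) =====
-- def find_matching_star(expr):
--     count = 0
--     i = 0
--     while i < len(expr):
--         if expr[i] == '(':
--             count += 1
--         elif expr[i] == ')':
--             count -= 1
--         elif expr[i] == '*' and count == 0:
--             return expr[:i], expr[i + 1:]
--         i += 1
--     return expr, ''
-- ===== SOURCE B (Python) =====
-- def find_matching_star(expr):
--     # Pass 1: exclusive prefix parenthesis depth for each position.
--     depths = [0] * (len(expr) + 1)
--     for i, c in enumerate(expr):
--         depths[i + 1] = depths[i] + (1 if c == '(' else -1 if c == ')' else 0)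
--     # Pass 2: first top-level '*' splits the string.
--     for i, c in enumerate(expr):
--         if c == '*' and depths[i] == 0:
--             return expr[:i], expr[i + 1:]
--     return expr, ''
-- ===== Notes on version B (the rewrite author's own statement) =====
-- stated objective: alternative
-- what changed: Replaces the single fused counter-loop with a two-pass decomposition: first a prefix-depth table of net parenthesis counts, then a separate scan for the first top-level asterisk at depth zero.
import Mathlib
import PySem

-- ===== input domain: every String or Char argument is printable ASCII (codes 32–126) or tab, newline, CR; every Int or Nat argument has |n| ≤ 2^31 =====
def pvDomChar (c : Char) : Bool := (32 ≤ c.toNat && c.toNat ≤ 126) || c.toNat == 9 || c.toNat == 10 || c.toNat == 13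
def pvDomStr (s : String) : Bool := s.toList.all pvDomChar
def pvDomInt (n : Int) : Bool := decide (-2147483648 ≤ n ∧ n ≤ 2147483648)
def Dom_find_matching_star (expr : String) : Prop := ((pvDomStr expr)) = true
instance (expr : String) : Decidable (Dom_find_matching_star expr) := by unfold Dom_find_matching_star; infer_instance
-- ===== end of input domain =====

-- B replaces A's single fused counter-loop by a two-pass decomposition (prefix-depth
-- table, then a separate scan for the first top-level asterisk at depth zero); objective: alternative.

-- ===== PORT A =====
-- A's while-loop over index i with a running parenthesis counter.
def find_matching_star_go (expr : String) (count : Int) (i : Nat) : String × String :=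
  let cs := expr.toList
  if h : i < cs.length then
    let c := cs[i]
    if c = '(' then find_matching_star_go expr (count + 1) (i + 1)
    else if c = ')' then find_matching_star_go expr (count - 1) (i + 1)
    else if c = '*' ∧ count = 0 then (String.ofList (cs.take i), String.ofList (cs.drop (i + 1)))
    else find_matching_star_go expr count (i + 1)
  else (expr, "")
termination_by expr.toList.length - i
decreasing_by
  all_goals
    have h' : i < expr.toList.length := by simpa using h
    omega

def find_matching_star (expr : String) : String × String :=
  find_matching_star_go expr 0 0

-- ===== PORT B =====
-- pass 1: exclusive prefix depths (Source B's depths array, built as a scan)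
def find_matching_star_step (d : Int) (c : Char) : Int :=
  if c = '(' then d + 1 else if c = ')' then d - 1 else d

def find_matching_star_alt (expr : String) : String × String :=
  let cs := expr.toList
  let depths := cs.scanl find_matching_star_step 0
  -- pass 2: first index whose char is '*' at depth 0
  match (cs.zip depths).findIdx? (fun p => p.1 == '*' && p.2 == 0) with
  | some i => (String.ofList (cs.take i), String.ofList (cs.drop (i + 1)))
  | none => (expr, "")

-- ===== PRECONDITION & SPEC =====
def Spec_find_matching_star (expr : String) (out : String × String) : Prop := out = find_matching_star_alt expr
instance (expr : String) (out : String × String) : Decidable (Spec_find_matching_star expr out) := by unfold Spec_find_matching_star; infer_instance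

-- ===== CLAIM (what is proved, stated in full; the proofs are below) =====
def Claim_equal_find_matching_star : Prop := ∀ (expr : String), Dom_find_matching_star expr → Spec_find_matching_star expr (find_matching_star expr)

-- ===== LEMMAS AND PROOFS =====

-- B's search on a suffix, parametrised by the entry depth
def pvBFind (cs : List Char) (d : Int) : Option Nat :=
  (cs.zip (cs.scanl find_matching_star_step d)).findIdx? (fun p => p.1 == '*' && p.2 == 0)

lemma pvBFind_nil (d : Int) : pvBFind [] d = none := by
  simp [pvBFind]

lemma pvBFind_cons (c : Char) (cs : List Char) (d : Int) :
    pvBFind (c :: cs) d =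
      if (c == '*' && d == 0) then some 0
      else (pvBFind cs (find_matching_star_step d c)).map (· + 1) := by
  simp [pvBFind, List.scanl, List.findIdx?_cons]

lemma pvMain (expr : String) :
    ∀ n i count, expr.toList.length - i ≤ n →
      find_matching_star_go expr count i =
        match pvBFind (expr.toList.drop i) count with
        | some j => (String.ofList (expr.toList.take (i + j)), String.ofList (expr.toList.drop (i + j + 1)))
        | none => (expr, "") := by
  intro n
  induction n with
  | zero =>
      intro i count h
      have hi : ¬ i < expr.toList.length := by omega
      unfold find_matching_star_go
      rw [dif_neg (by simpa using hi), List.drop_eq_nil_of_le (by omega), pvBFind_nil]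
  | succ n ih =>
      intro i count h
      by_cases hi : i < expr.toList.length
      · have hdrop : expr.toList.drop i = expr.toList[i] :: expr.toList.drop (i + 1) :=
          List.drop_eq_getElem_cons hi
        unfold find_matching_star_go
        rw [dif_pos (by simpa using hi)]
        rw [hdrop, pvBFind_cons]
        by_cases h1 : expr.toList[i] = '('
        · rw [if_pos h1]
          simp only [h1]
          rw [show ('(' == '*' && count == 0) = false from by simp,
            show find_matching_star_step count '(' = count + 1 from by simp [find_matching_star_step]]
          simp only [Bool.false_eq_true, if_false]
          rw [ih (i + 1) (count + 1) (by omega)]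
          cases pvBFind (expr.toList.drop (i + 1)) (count + 1) with
          | none => simp
          | some j =>
              have e : i + 1 + j = i + (j + 1) := by omega
              simp [e]
        · by_cases h2 : expr.toList[i] = ')'
          · rw [if_neg h1, if_pos h2]
            simp only [h2]
            rw [show (')' == '*' && count == 0) = false from by simp,
              show find_matching_star_step count ')' = count - 1 from by simp [find_matching_star_step]]
            simp only [Bool.false_eq_true, if_false]
            rw [ih (i + 1) (count - 1) (by omega)]
            cases pvBFind (expr.toList.drop (i + 1)) (count - 1) with
            | none => simp
            | some j =>
                have e : i + 1 + j = i + (j + 1) := by omega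
                simp [e]
          · by_cases h3 : expr.toList[i] = '*' ∧ count = 0
            · rw [if_neg h1, if_neg h2, if_pos h3]
              have hp : (expr.toList[i] == '*' && count == 0) = true := by
                simp [h3.1, h3.2]
              rw [if_pos hp]
              simp
            · rw [if_neg h1, if_neg h2, if_neg h3]
              have hp : (expr.toList[i] == '*' && count == 0) = false := by
                simp only [Bool.and_eq_false_iff]
                by_cases hs : expr.toList[i] = '*'
                · right; exact beq_eq_false_iff_ne.mpr (fun hc => h3 ⟨hs, hc⟩)
                · left; simp [hs]
              have hstep : find_matching_star_step count expr.toList[i] = count := by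
                simp [find_matching_star_step, h1, h2]
              rw [hp, hstep]
              simp only [Bool.false_eq_true, if_false]
              rw [ih (i + 1) count (by omega)]
              cases pvBFind (expr.toList.drop (i + 1)) count with
              | none => simp
              | some j =>
                  have e : i + 1 + j = i + (j + 1) := by omega
                  simp [e]
      · unfold find_matching_star_go
        rw [dif_neg (by simpa using hi), List.drop_eq_nil_of_le (by omega), pvBFind_nil]

-- ===== VERDICT (by name: the statement is the Claim_ definition above) =====
theorem find_matching_star_spec : Claim_equal_find_matching_star := by
  intro expr _
  unfold Spec_find_matching_star find_matching_star find_matching_star_alt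
  rw [pvMain expr expr.toList.length 0 0 (by omega)]
  show (match pvBFind (expr.toList.drop 0) 0 with
        | some j => (String.ofList (expr.toList.take (0 + j)), String.ofList (expr.toList.drop (0 + j + 1)))
        | none => (expr, "")) = _
  simp only [List.drop_zero, Nat.zero_add, pvBFind]
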